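-- pv_equiv track=rewrite | github.com/defin85/onec-formbin | scripts/validate_dataset.py | collect_ids
-- ===== SOURCE A (Python) =====
-- from typing import Any
--
-- def collect_ids(records: list[dict[str, Any]], label: str) -> set[str]:
--     ids: set[str] = set()
--     duplicates: list[str] = []
--     for record in records:
--         record_id = record["id"]
--         if record_id in ids:
--             duplicates.append(record_id)
--         ids.add(record_id)
--     if duplicates:
--         duplicate_list = ", ".join(sorted(set(duplicates)))
--         raise ValueError(f"{label}: duplicate ids found: {duplicate_list}")
--     return ids
-- ===== SOURCE B (Python) =====
-- def collect_ids(records, label):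
--     counts = {}
--     for record in records:
--         record_id = record["id"]
--         counts[record_id] = counts.get(record_id, 0) + 1
--     duplicates = sorted(i for i, c in counts.items() if c > 1)
--     if duplicates:
--         duplicate_list = ", ".join(duplicates)
--         raise ValueError(f"{label}: duplicate ids found: {duplicate_list}")
--     return set(counts)
-- ===== Notes on version B (the rewrite author's own statement) =====
-- stated objective: alternative
-- what changed: Replaces the inline seen-set/duplicates-list loop with a one-pass frequency table (dict of counts) plus a separate filtering pass over the table that extracts the duplicated ids; the id set is read off the table's keys.
import Mathlib
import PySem

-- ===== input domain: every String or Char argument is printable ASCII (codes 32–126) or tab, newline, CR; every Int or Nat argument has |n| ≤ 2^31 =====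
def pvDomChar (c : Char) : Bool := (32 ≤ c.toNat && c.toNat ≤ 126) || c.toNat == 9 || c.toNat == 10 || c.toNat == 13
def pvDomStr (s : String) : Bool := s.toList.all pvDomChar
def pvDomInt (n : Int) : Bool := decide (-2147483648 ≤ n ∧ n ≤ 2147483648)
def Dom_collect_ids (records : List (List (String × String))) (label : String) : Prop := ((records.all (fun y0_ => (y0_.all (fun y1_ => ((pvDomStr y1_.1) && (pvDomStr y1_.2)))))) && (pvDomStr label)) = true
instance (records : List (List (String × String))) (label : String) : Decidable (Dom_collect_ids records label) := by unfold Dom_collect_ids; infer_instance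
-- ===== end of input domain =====

-- B replaces A's inline seen-set/duplicates loop by a frequency table built in one pass,
-- with duplicates extracted by a separate filtering pass over the table (objective: alternative).

-- record["id"]; the .getD "" is only reached where the key is missing, which Pre_ excludes (KeyError)
def pvIdOf (r : List (String × String)) : String := ((PySem.Dict.mk r).get? "id").getD ""

-- ===== PORT A =====
def collect_ids (records : List (List (String × String))) (label : String) : List String :=
  let st :=
    records.foldl
      (fun (st : PySem.Set String × List String) record =>
        let record_id := pvIdOf record
        let duplicates := if PySem.Set.contains st.1 record_id then st.2 ++ [record_id] else st.2
        (PySem.Set.add st.1 record_id, duplicates))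
      (PySem.Set.empty, [])
  -- if st.2 ≠ [] Python raises ValueError; Pre_ excludes those inputs
  st.1

-- ===== PORT B =====
def collect_ids_alt (records : List (List (String × String))) (label : String) : List String :=
  let counts : PySem.Dict String Int :=
    records.foldl (fun d record => d.modify (pvIdOf record) 0 (· + 1)) PySem.Dict.empty
  let duplicates :=
    PySem.List.sorted (counts.items.filterMap (fun p => if 1 < p.2 then some p.1 else none)) (fun x => x) false
  -- if duplicates ≠ [] Python raises ValueError; Pre_ excludes those inputs
  counts.keys

-- ===== PRECONDITION & SPEC =====
-- Pre_ excludes exactly the inputs where A raises: a record without an "id" key (KeyError)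
-- or a repeated id (ValueError).
def Pre_collect_ids (records : List (List (String × String))) (label : String) : Prop :=
  (∀ r ∈ records, ((PySem.Dict.mk r).get? "id").isSome) ∧ (records.map pvIdOf).Nodup
instance (records : List (List (String × String))) (label : String) : Decidable (Pre_collect_ids records label) := by unfold Pre_collect_ids; infer_instance

def pvWitness_collect_ids : (List (List (String × String))) × String :=
  ([[("id", "a")], [("id", "b"), ("x", "y")]], "lbl")

def Spec_collect_ids (records : List (List (String × String))) (label : String) (out : List String) : Prop := out = collect_ids_alt records label
instance (records : List (List (String × String))) (label : String) (out : List String) : Decidable (Spec_collect_ids records label out) := by unfold Spec_collect_ids; infer_instance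

-- ===== CLAIM (what is proved, stated in full; the proofs are below) =====
def Claim_equal_collect_ids : Prop := ∀ (records : List (List (String × String))) (label : String), Dom_collect_ids records label → Pre_collect_ids records label → Spec_collect_ids records label (collect_ids records label)

-- ===== LEMMAS AND PROOFS =====

-- A's loop: the first component of the pair state is the set-fold of the ids alone.
theorem collect_ids_fst_foldl (records : List (List (String × String)))
    (s : PySem.Set String) (d : List String) :
    (records.foldl
      (fun (st : PySem.Set String × List String) record =>
        (PySem.Set.add st.1 (pvIdOf record),
          if PySem.Set.contains st.1 (pvIdOf record) then st.2 ++ [pvIdOf record] else st.2))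
      (s, d)).1
    = records.foldl (fun s record => PySem.Set.add s (pvIdOf record)) s := by
  induction records generalizing s d with
  | nil => rfl
  | cons r rs ih => simpa using ih _ _

-- ===== VERDICT (by name: the statement is the Claim_ definition above) =====
theorem collect_ids_spec : Claim_equal_collect_ids := by
  intro records label _ _
  unfold Spec_collect_ids collect_ids collect_ids_alt
  rw [collect_ids_fst_foldl]
  rw [PySem.Dict.keys_foldl_modify_key]
  simp [PySem.Set.update, List.foldl_map]
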